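-- pv_equiv track=rewrite | github.com/veldhub/veld_code__wordembeddings_preprocessing | src/preprocess_remove_punctuation.py | get_index_start_end_list
-- ===== SOURCE A (Python) =====
-- def get_interval_index_list(num_lines, num_intervals):
--     step = int(round(num_lines / num_intervals))
--     interval_index_list = []
--     for i in range(1, num_intervals + 1):
--         if i < num_intervals:
--             interval_index_list.append(step * i)
--         else:
--             interval_index_list.append(num_lines - 1)
--     return interval_index_list
--
-- def get_index_start_end_list(num_lines, num_intervals):
--     interval_index_list = get_interval_index_list(num_lines, num_intervals)
--     index_start_end_list = []
--     index_start = 0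
--     for index_end in interval_index_list:
--         index_start_end_list.append((index_start, index_end))
--         index_start = index_end + 1
--     return index_start_end_list
-- ===== SOURCE B (Python) =====
-- def get_index_start_end_list(num_lines, num_intervals):
--     step = int(round(num_lines / num_intervals))
--     result = []
--     for j in range(num_intervals):
--         start = 0 if j == 0 else step * j + 1
--         end = num_lines - 1 if j == num_intervals - 1 else step * (j + 1)
--         result.append((start, end))
--     return result
-- ===== Notes on version B (the rewrite author's own statement) =====
-- stated objective: simpler
-- what changed: Single loop computing each (start, end) pair from the index by closed form (start = step*j+1, end = step*(j+1) with boundary overrides), replacing the helper that builds an end-index list plus a second loop threading an index_start accumulator.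
import Mathlib
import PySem

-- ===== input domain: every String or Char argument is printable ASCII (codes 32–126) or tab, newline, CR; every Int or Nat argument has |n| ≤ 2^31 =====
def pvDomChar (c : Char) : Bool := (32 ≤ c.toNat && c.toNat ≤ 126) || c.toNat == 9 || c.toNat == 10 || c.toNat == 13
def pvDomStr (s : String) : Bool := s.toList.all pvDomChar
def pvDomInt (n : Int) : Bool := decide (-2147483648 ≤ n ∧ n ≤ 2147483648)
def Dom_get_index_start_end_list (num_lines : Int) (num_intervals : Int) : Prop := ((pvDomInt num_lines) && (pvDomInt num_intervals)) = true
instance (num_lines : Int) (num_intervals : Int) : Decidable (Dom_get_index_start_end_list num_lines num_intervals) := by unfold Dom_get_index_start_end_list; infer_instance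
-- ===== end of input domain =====

-- B replaces A's end-index helper list and carried index_start accumulator by one loop
-- computing each (start, end) pair directly from the loop index (objective: simpler).

-- ===== PORT A =====
-- int(round(a / b)) for b ≠ 0: round-half-to-even of the exact rational a/b.
-- Exact on the domain |a|,|b| ≤ 2^31: there the float quotient's rounding error is
-- smaller than half the distance from any non-tie rational a/b to a half-integer,
-- so Python's float division + round agrees with exact half-even rounding.
def pyRoundDiv (a : Int) (b : Int) : Int :=
  let q := PySem.Int.floordiv a b
  let r := PySem.Int.mod a b
  if 2 * r.natAbs < b.natAbs then q
  else if b.natAbs < 2 * r.natAbs then q + 1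
  else if q % 2 = 0 then q else q + 1

def get_interval_index_list (num_lines : Int) (num_intervals : Int) : List Int :=
  let step := pyRoundDiv num_lines num_intervals
  (PySem.List.pyRange 1 (num_intervals + 1) 1).foldl
    (fun acc i => acc ++ [if i < num_intervals then step * i else num_lines - 1]) []

def get_index_start_end_list (num_lines : Int) (num_intervals : Int) : List (Int × Int) :=
  let l := get_interval_index_list num_lines num_intervals
  (l.foldl (fun st index_end => (st.1 ++ [(st.2, index_end)], index_end + 1))
    (([] : List (Int × Int)), (0 : Int))).1

-- ===== PORT B =====
def get_index_start_end_list_alt (num_lines : Int) (num_intervals : Int) : List (Int × Int) :=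
  let step := pyRoundDiv num_lines num_intervals
  (PySem.List.pyRange 0 num_intervals 1).foldl
    (fun acc j => acc ++ [((if j = 0 then 0 else step * j + 1),
                           (if j = num_intervals - 1 then num_lines - 1 else step * (j + 1)))]) []

-- ===== PRECONDITION & SPEC =====
-- num_intervals = 0 makes A raise ZeroDivisionError; excluded.
def Pre_get_index_start_end_list (num_lines : Int) (num_intervals : Int) : Prop := num_intervals ≠ 0
instance (num_lines : Int) (num_intervals : Int) : Decidable (Pre_get_index_start_end_list num_lines num_intervals) := by unfold Pre_get_index_start_end_list; infer_instance
def pvWitness_get_index_start_end_list : Int × Int := (10, 3)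

def Spec_get_index_start_end_list (num_lines : Int) (num_intervals : Int) (out : List (Int × Int)) : Prop := out = get_index_start_end_list_alt num_lines num_intervals
instance (num_lines : Int) (num_intervals : Int) (out : List (Int × Int)) : Decidable (Spec_get_index_start_end_list num_lines num_intervals out) := by unfold Spec_get_index_start_end_list; infer_instance

-- ===== CLAIM (what is proved, stated in full; the proofs are below) =====
def Claim_equal_get_index_start_end_list : Prop := ∀ (num_lines : Int) (num_intervals : Int), Dom_get_index_start_end_list num_lines num_intervals → Pre_get_index_start_end_list num_lines num_intervals → Spec_get_index_start_end_list num_lines num_intervals (get_index_start_end_list num_lines num_intervals)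

-- ===== LEMMAS AND PROOFS =====

-- A's second loop in closed form: starts are 0 then previous end + 1.
def pvPairs (s : Int) : List Int → List (Int × Int)
  | [] => []
  | e :: t => (s, e) :: pvPairs (e + 1) t

lemma pvPairs_length (l : List Int) : ∀ s, (pvPairs s l).length = l.length := by
  induction l with
  | nil => intro s; rfl
  | cons e t ih => intro s; simp [pvPairs, ih]

lemma foldl_pairs (l : List Int) : ∀ (acc : List (Int × Int)) (s : Int),
    (l.foldl (fun st e => (st.1 ++ [(st.2, e)], e + 1)) (acc, s)).1 = acc ++ pvPairs s l := by
  induction l with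
  | nil => intro acc s; simp [pvPairs]
  | cons e t ih => intro acc s; simp [List.foldl, pvPairs, ih]

lemma pvPairs_getElem (l : List Int) : ∀ (s : Int) (k : Nat) (h : k < l.length),
    (pvPairs s l)[k]'(by rw [pvPairs_length]; exact h)
      = (if hk : k = 0 then s else l[k - 1]'(by omega) + 1, l[k]'h) := by
  induction l with
  | nil => intro s k h; simp at h
  | cons e t ih =>
    intro s k h
    cases k with
    | zero => simp [pvPairs]
    | succ k' =>
      simp only [pvPairs, List.getElem_cons_succ]
      rw [ih (e + 1) k' (by simpa using h)]
      cases k' with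
      | zero => simp
      | succ k'' => simp

theorem get_index_start_end_list_spec : Claim_equal_get_index_start_end_list := by
  unfold Claim_equal_get_index_start_end_list
  intro num_lines num_intervals _ hpre
  unfold Spec_get_index_start_end_list
  unfold get_index_start_end_list get_index_start_end_list_alt get_interval_index_list
  simp only []
  rw [PySem.List.foldl_append_singleton_eq_map, PySem.List.foldl_append_singleton_eq_map,
      foldl_pairs, List.nil_append, List.nil_append]
  by_cases hn : num_intervals ≤ 0
  · rw [PySem.List.pyRange_one_eq_nil (by omega), PySem.List.pyRange_one_eq_nil hn]
    rfl
  · push Not at hn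
    set step := pyRoundDiv num_lines num_intervals with hstep
    clear hstep
    rw [PySem.List.pyRange_one 1 (num_intervals + 1),
        PySem.List.pyRange_one 0 num_intervals]
    apply List.ext_getElem
    · simp [pvPairs_length]
    · intro k h1 h2
      simp only [List.nil_append, List.getElem_map, List.getElem_range, zero_add] at h2 ⊢
      have hkl : k < (List.map (fun i => if i < num_intervals then step * i else num_lines - 1)
          ((List.range (num_intervals + 1 - 1).toNat).map fun k => 1 + (k : Int))).length := by
        simpa [pvPairs_length] using h1
      have hkn : (k : Int) < num_intervals := by
        simp [pvPairs_length] at h1; omega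
      rw [pvPairs_getElem _ 0 k (by simpa using hkl)]
      simp only [List.getElem_map, List.getElem_range]
      have hc : k ≠ 0 → ((k - 1 : Nat) : Int) = (k : Int) - 1 := by omega
      rw [Prod.mk.injEq]
      constructor
      · by_cases hk0 : k = 0
        · subst hk0
          simp
        · rw [dif_neg hk0, if_neg (show ¬((k : Int) = 0) by omega)]
          rw [if_pos (show (1 : Int) + ((k - 1 : Nat) : Int) < num_intervals by
                rw [hc hk0]; omega)]
          rw [hc hk0]; ring
      · by_cases hlast : (k : Int) = num_intervals - 1
        · rw [if_neg (show ¬((1 : Int) + (k : Nat) < num_intervals) by omega), if_pos hlast]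
        · rw [if_pos (show (1 : Int) + (k : Nat) < num_intervals by omega), if_neg hlast]
          ring
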